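-- pv_equiv track=rewrite | github.com/Mahaprasadnanda/zerify | backend/app/aadhaar_qr.py | _pick_best_aadhaar_qr
-- ===== SOURCE A (Python) =====
-- def _pick_best_aadhaar_qr(candidates: list[tuple[str, dict[str, int] | None]]) -> tuple[str, dict[str, int] | None] | None:
--     """Prefer UIDAI secure QR: long all-decimal string; avoid short URL/marketing QRs on the card."""
--     if not candidates:
--         return None
--     digit_long = [(t, b) for t, b in candidates if t.isdigit() and len(t) >= 200]
--     if digit_long:
--         return max(digit_long, key=lambda x: len(x[0]))
--     digit_mid = [(t, b) for t, b in candidates if t.isdigit() and len(t) >= 80]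
--     if digit_mid:
--         return max(digit_mid, key=lambda x: len(x[0]))
--     digit_any = [(t, b) for t, b in candidates if t.isdigit()]
--     if digit_any:
--         return max(digit_any, key=lambda x: len(x[0]))
--     # Never return http(s) / marketing strings as the secure payload — keep scanning other crops.
--     return None
-- ===== SOURCE B (Python) =====
-- def _pick_best_aadhaar_qr(candidates):
--     """One pass: keep the first longest all-digit candidate seen so far.
--
--     Tier thresholds (>=200, >=80, any) in the original collapse: the tier value
--     is a monotone function of the length, so the tiered cascade always returns
--     the first longest all-digit string overall.
--     """
--     best = None
--     for t, b in candidates: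
--         if t.isdigit() and (best is None or len(t) > len(best[0])):
--             best = (t, b)
--     return best
-- ===== Notes on version B (the rewrite author's own statement) =====
-- stated objective: simpler
-- what changed: Replaces the three tiered filter-then-max passes and early-return cascade with a single accumulator loop keeping the first longest all-digit candidate (the tier value is monotone in length, so the cascade always picks the overall first longest).
import Mathlib
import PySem

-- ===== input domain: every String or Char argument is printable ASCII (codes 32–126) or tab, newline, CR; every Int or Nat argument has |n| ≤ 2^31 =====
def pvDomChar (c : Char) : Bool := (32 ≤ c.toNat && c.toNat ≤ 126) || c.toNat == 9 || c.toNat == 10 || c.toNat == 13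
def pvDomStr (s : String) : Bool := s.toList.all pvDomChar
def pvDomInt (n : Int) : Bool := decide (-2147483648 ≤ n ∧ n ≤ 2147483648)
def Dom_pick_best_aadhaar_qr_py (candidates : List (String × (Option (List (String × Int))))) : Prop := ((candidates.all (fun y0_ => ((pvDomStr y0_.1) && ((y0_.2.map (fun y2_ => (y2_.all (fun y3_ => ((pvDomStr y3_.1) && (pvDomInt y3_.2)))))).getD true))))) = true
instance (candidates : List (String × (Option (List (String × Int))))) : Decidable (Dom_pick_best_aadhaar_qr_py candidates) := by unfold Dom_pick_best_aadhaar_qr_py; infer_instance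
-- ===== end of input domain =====

-- B replaces A's three tiered filter+max passes with one accumulator loop keeping the first
-- longest all-digit candidate (objective: simpler — the tier value is monotone in the length).

-- ===== PORT A =====
def pick_best_aadhaar_qr_py (candidates : List (String × (Option (List (String × Int))))) : Option (String × (Option (List (String × Int)))) :=
  if candidates.isEmpty then none else
  let digit_long := candidates.filter (fun x => PySem.Str.strIsdigit x.1 && decide (200 ≤ PySem.Str.len x.1))
  if !digit_long.isEmpty then PySem.List.max? digit_long (fun x => PySem.Str.len x.1) else
  let digit_mid := candidates.filter (fun x => PySem.Str.strIsdigit x.1 && decide (80 ≤ PySem.Str.len x.1))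
  if !digit_mid.isEmpty then PySem.List.max? digit_mid (fun x => PySem.Str.len x.1) else
  let digit_any := candidates.filter (fun x => PySem.Str.strIsdigit x.1)
  if !digit_any.isEmpty then PySem.List.max? digit_any (fun x => PySem.Str.len x.1) else
  none

-- ===== PORT B =====
-- Source B's loop body: `if t.isdigit() and (best is None or len(t) > len(best[0])): best = (t, b)`
def pickBestStep (best : Option (String × (Option (List (String × Int))))) (x : String × (Option (List (String × Int)))) : Option (String × (Option (List (String × Int)))) :=
  if PySem.Str.strIsdigit x.1 then
    match best with
    | none => some x
    | some b => if PySem.Str.len b.1 < PySem.Str.len x.1 then some x else some b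
  else best

def pick_best_aadhaar_qr_py_alt (candidates : List (String × (Option (List (String × Int))))) : Option (String × (Option (List (String × Int)))) :=
  candidates.foldl pickBestStep none

-- ===== PRECONDITION & SPEC =====
def Spec_pick_best_aadhaar_qr_py (candidates : List (String × (Option (List (String × Int))))) (out : Option (String × (Option (List (String × Int))))) : Prop := out = pick_best_aadhaar_qr_py_alt candidates
instance (candidates : List (String × (Option (List (String × Int))))) (out : Option (String × (Option (List (String × Int))))) : Decidable (Spec_pick_best_aadhaar_qr_py candidates out) := by unfold Spec_pick_best_aadhaar_qr_py; infer_instance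

-- ===== CLAIM (what is proved, stated in full; the proofs are below) =====
def Claim_equal_pick_best_aadhaar_qr_py : Prop := ∀ (candidates : List (String × (Option (List (String × Int))))), Dom_pick_best_aadhaar_qr_py candidates → Spec_pick_best_aadhaar_qr_py candidates (pick_best_aadhaar_qr_py candidates)

-- ===== LEMMAS AND PROOFS =====

-- the running-max step of PySem.List.max? for an arbitrary key
def mstep {α : Type} (key : α → Int) (acc : Option α) (x : α) : Option α :=
  match acc with
  | none => some x
  | some m => if key m < key x then some x else some m

theorem max?_eq_foldl_mstep {α : Type} (xs : List α) (key : α → Int) :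
    PySem.List.max? xs key = xs.foldl (mstep key) none := rfl

-- B's guarded step on the full list is the max? step on the digit-filtered list
theorem foldl_pickBestStep_eq (candidates : List (String × (Option (List (String × Int)))))
    (acc : Option (String × (Option (List (String × Int))))) :
    candidates.foldl pickBestStep acc
      = (candidates.filter (fun x => PySem.Str.strIsdigit x.1)).foldl
          (mstep (fun x => PySem.Str.len x.1)) acc := by
  induction candidates generalizing acc with
  | nil => rfl
  | cons x t ih =>
    simp only [List.foldl_cons, List.filter_cons]
    cases hd : PySem.Str.strIsdigit x.1
    · rw [if_neg (by decide)]
      have hstep : pickBestStep acc x = acc := by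
        unfold pickBestStep; rw [hd]; rfl
      rw [hstep]; exact ih acc
    · rw [if_pos rfl, List.foldl_cons]
      have hstep : pickBestStep acc x = mstep (fun x => PySem.Str.len x.1) acc x := by
        unfold pickBestStep; rw [hd]; cases acc <;> rfl
      rw [hstep]; exact ih _

-- once the accumulator is above the threshold, filtering by the threshold does not matter
theorem foldl_mstep_some_filter {α : Type} (key : α → Int) (K : Int) :
    ∀ (ds : List α) (m : α), K ≤ key m →
    (ds.filter (fun a => decide (K ≤ key a))).foldl (mstep key) (some m)
      = ds.foldl (mstep key) (some m) := by
  intro ds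
  induction ds with
  | nil => intro m _; rfl
  | cons x t ih =>
    intro m hm
    simp only [List.filter_cons, List.foldl_cons]
    by_cases hx : K ≤ key x
    · rw [if_pos (decide_eq_true hx), List.foldl_cons]
      by_cases hlt : key m < key x
      · simp only [mstep, if_pos hlt]; exact ih x hx
      · simp only [mstep, if_neg hlt]; exact ih m hm
    · have hlt : ¬ key m < key x := by omega
      rw [if_neg (by simp [hx])]
      simp only [mstep, if_neg hlt]
      exact ih m hm

-- while the threshold-filtered list is nonempty, a sub-threshold accumulator is irrelevant
theorem foldl_mstep_filter_eq {α : Type} (key : α → Int) (K : Int) :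
    ∀ (ds : List α) (acc : Option α), (∀ b, acc = some b → key b < K) →
    (ds.filter (fun a => decide (K ≤ key a))) ≠ [] →
    (ds.filter (fun a => decide (K ≤ key a))).foldl (mstep key) none
      = ds.foldl (mstep key) acc := by
  intro ds
  induction ds with
  | nil => intro acc _ hne; exact absurd rfl hne
  | cons x t ih =>
    intro acc hacc hne
    by_cases hx : K ≤ key x
    · simp only [List.filter_cons] at hne ⊢
      rw [if_pos (decide_eq_true hx)] at hne ⊢
      simp only [List.foldl_cons]
      have hstep : mstep key acc x = some x := by
        cases acc with
        | none => rfl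
        | some b =>
          have : key b < key x := lt_of_lt_of_le (hacc b rfl) hx
          simp [mstep, this]
      rw [hstep]
      have h0 : mstep key none x = some x := rfl
      rw [h0]
      exact foldl_mstep_some_filter key K t x hx
    · simp only [List.filter_cons] at hne ⊢
      rw [if_neg (by simp [hx])] at hne ⊢
      simp only [List.foldl_cons]
      refine ih (mstep key acc x) ?_ hne
      intro b hb
      cases acc with
      | none =>
        simp only [mstep] at hb
        injection hb with h; subst h; omega
      | some m =>
        have hm := hacc m rfl
        simp only [mstep] at hb
        split at hb <;> (injection hb with h; subst h; omega)

-- A's tiered max equals the max over all digit candidates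
theorem max?_filter_threshold {α : Type} (key : α → Int) (K : Int) (ds : List α)
    (hne : ds.filter (fun a => decide (K ≤ key a)) ≠ []) :
    PySem.List.max? (ds.filter (fun a => decide (K ≤ key a))) key = PySem.List.max? ds key := by
  rw [max?_eq_foldl_mstep, max?_eq_foldl_mstep]
  exact foldl_mstep_filter_eq key K ds none (by intro b h; cases h) hne

theorem alt_eq_max? (candidates : List (String × (Option (List (String × Int))))) :
    pick_best_aadhaar_qr_py_alt candidates
      = PySem.List.max? (candidates.filter (fun x => PySem.Str.strIsdigit x.1))
          (fun x => PySem.Str.len x.1) := by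
  rw [pick_best_aadhaar_qr_py_alt, foldl_pickBestStep_eq, max?_eq_foldl_mstep]

theorem filter_and_threshold (candidates : List (String × (Option (List (String × Int))))) (K : Int) :
    candidates.filter (fun x => PySem.Str.strIsdigit x.1 && decide (K ≤ PySem.Str.len x.1))
      = (candidates.filter (fun x => PySem.Str.strIsdigit x.1)).filter
          (fun x => decide (K ≤ PySem.Str.len x.1)) := by
  rw [List.filter_filter]
  apply List.filter_congr
  intro x _
  exact (Bool.and_comm _ _)

-- ===== VERDICT (by name: the statement is the Claim_ definition above) =====
theorem pick_best_aadhaar_qr_py_spec : Claim_equal_pick_best_aadhaar_qr_py := by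
  unfold Claim_equal_pick_best_aadhaar_qr_py
  intro candidates _
  unfold Spec_pick_best_aadhaar_qr_py
  rw [alt_eq_max?, pick_best_aadhaar_qr_py]
  cases hc : candidates.isEmpty with
  | true =>
    have h0 : candidates = [] := List.isEmpty_iff.mp hc
    subst h0; rfl
  | false =>
    rw [if_neg (by decide)]
    simp only [filter_and_threshold]
    set ds := candidates.filter (fun x => PySem.Str.strIsdigit x.1) with hds
    cases h200 : (ds.filter (fun x => decide ((200:Int) ≤ PySem.Str.len x.1))).isEmpty with
    | false =>
      rw [if_pos (by decide)]
      exact (max?_filter_threshold _ 200 ds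
        (by intro hnil; rw [hnil] at h200; exact absurd h200 (by decide)))
    | true =>
      rw [if_neg (by decide)]
      cases h80 : (ds.filter (fun x => decide ((80:Int) ≤ PySem.Str.len x.1))).isEmpty with
      | false =>
        rw [if_pos (by decide)]
        exact (max?_filter_threshold _ 80 ds
          (by intro hnil; rw [hnil] at h80; exact absurd h80 (by decide)))
      | true =>
        rw [if_neg (by decide)]
        cases hany : ds.isEmpty with
        | false => rw [if_pos (by decide)]
        | true =>
          rw [if_neg (by decide)]
          rw [show ds = [] from List.isEmpty_iff.mp hany]; rfl
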